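-- pv_equiv track=rewrite | github.com/fractalmind-ai/agent-os-roms | roms/manager-heavy-core/templates/.agent/skills/notifier/scripts/notify.py | normalize_feishu_markdown
-- ===== SOURCE A (Python) =====
-- def normalize_feishu_markdown(text: str) -> str:
--     """Feishu card markdown treats single newlines as spaces.
--
--     Convert plain newlines into markdown hard line breaks (two trailing spaces
--     before newline), while preserving code fences.
--     """
--     if text is None:
--         return ""
--
--     text = text.replace("\r\n", "\n").replace("\r", "\n")
--     lines = text.split("\n")
--
--     out: list[str] = []
--     in_code_block = False
--
--     for line in lines:
--         stripped = line.strip()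
--         if stripped.startswith("```"):
--             in_code_block = not in_code_block
--             out.append(line)
--             continue
--
--         if in_code_block or line == "":
--             out.append(line)
--         else:
--             # Markdown hard line break: end the line with two spaces.
--             out.append(line + "  ")
--
--     return "\n".join(out)
-- ===== SOURCE B (Python) =====
-- def normalize_feishu_markdown(text: str) -> str:
--     if text is None:
--         return ""
--     lines = text.replace("\r\n", "\n").replace("\r", "\n").split("\n")
--
--     def is_fence(line: str) -> bool:
--         return line.strip().startswith("```")
--
--     out = []
--     i, n = 0, len(lines)
--     while i < n:
--         line = lines[i]
--         if is_fence(line):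
--             # copy the whole fenced block (opening fence, body, closing fence) verbatim
--             out.append(line)
--             i += 1
--             while i < n and not is_fence(lines[i]):
--                 out.append(lines[i])
--                 i += 1
--             if i < n:
--                 out.append(lines[i])
--                 i += 1
--         else:
--             out.append(line if line == "" else line + "  ")
--             i += 1
--     return "\n".join(out)
-- ===== Notes on version B (the rewrite author's own statement) =====
-- stated objective: alternative
-- what changed: Replaces A's single pass with an in_code_block boolean state machine by an outer/inner two-loop walk that, on seeing a fence line, copies the whole fenced block (opening fence, body, closing fence) verbatim as a unit before resuming the hard-break transformation.
import Mathlib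
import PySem

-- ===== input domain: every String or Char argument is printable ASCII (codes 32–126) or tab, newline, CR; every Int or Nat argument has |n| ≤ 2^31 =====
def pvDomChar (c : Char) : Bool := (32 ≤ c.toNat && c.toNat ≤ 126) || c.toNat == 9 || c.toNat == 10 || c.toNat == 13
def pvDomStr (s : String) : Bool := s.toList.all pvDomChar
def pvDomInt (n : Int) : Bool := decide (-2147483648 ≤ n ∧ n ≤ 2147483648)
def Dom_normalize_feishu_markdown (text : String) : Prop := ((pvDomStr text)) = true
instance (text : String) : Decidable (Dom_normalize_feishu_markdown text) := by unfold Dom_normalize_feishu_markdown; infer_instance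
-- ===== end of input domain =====

-- B replaces A's per-line in_code_block state machine with an outer/inner two-loop
-- shape that copies each fenced block (fences and body) verbatim as a unit; objective: alternative.

-- ===== PORT A =====
-- A's loop body: out/in_code_block state, branches in A's order
def pvStepA (st : List String × Bool) (line : String) : List String × Bool :=
  let stripped := PySem.Str.strip line
  if PySem.Str.startswith stripped "```" then (st.1 ++ [line], !st.2)
  else if st.2 || line == "" then (st.1 ++ [line], st.2)
  else (st.1 ++ [line ++ "  "], st.2)

def normalize_feishu_markdown (text : String) : String :=
  let t := PySem.Str.replace (PySem.Str.replace text "\r\n" "\n") "\r" "\n"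
  -- sep "\n" is nonempty, so split? is always `some`
  let lines := (PySem.Str.split? t "\n").getD []
  let res := lines.foldl pvStepA ([], false)
  PySem.Str.join "\n" res.1

-- ===== PORT B =====
def pvIsFence (line : String) : Bool :=
  PySem.Str.startswith (PySem.Str.strip line) "```"

-- B's nested while loops: pvOutsideB is the outer loop, pvInsideB the inner
-- "copy the fenced block verbatim until the closing fence" loop.
mutual
def pvOutsideB : List String → List String
  | [] => []
  | line :: rest =>
    if pvIsFence line then line :: pvInsideB rest
    else (if line == "" then line else line ++ "  ") :: pvOutsideB rest
def pvInsideB : List String → List String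
  | [] => []
  | line :: rest =>
    if pvIsFence line then line :: pvOutsideB rest
    else line :: pvInsideB rest
end

def normalize_feishu_markdown_alt (text : String) : String :=
  let lines := (PySem.Str.split? (PySem.Str.replace (PySem.Str.replace text "\r\n" "\n") "\r" "\n") "\n").getD []
  PySem.Str.join "\n" (pvOutsideB lines)

-- ===== PRECONDITION & SPEC =====
def Spec_normalize_feishu_markdown (text : String) (out : String) : Prop := out = normalize_feishu_markdown_alt text
instance (text : String) (out : String) : Decidable (Spec_normalize_feishu_markdown text out) := by unfold Spec_normalize_feishu_markdown; infer_instance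

-- ===== CLAIM (what is proved, stated in full; the proofs are below) =====
def Claim_equal_normalize_feishu_markdown : Prop := ∀ (text : String), Dom_normalize_feishu_markdown text → Spec_normalize_feishu_markdown text (normalize_feishu_markdown text)

-- ===== LEMMAS AND PROOFS =====
-- A's fold over (out, in_code_block) produces acc ++ (B's inside/outside chunk walk)
lemma pvFoldA_eq (lines : List String) : ∀ (acc : List String) (b : Bool),
    (lines.foldl pvStepA (acc, b)).1
      = acc ++ (if b then pvInsideB lines else pvOutsideB lines) := by
  induction lines with
  | nil => intro acc b; cases b <;> simp [pvInsideB, pvOutsideB]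
  | cons line rest ih =>
    intro acc b
    simp only [List.foldl_cons, pvStepA]
    by_cases hf : PySem.Chars.startswith (PySem.Chars.strip line.toList) ['`', '`', '`']
    · cases b <;> simp [hf, ih, pvOutsideB, pvInsideB, pvIsFence]
    · by_cases he : line == "" <;> cases b <;>
        simp_all [pvOutsideB, pvInsideB, pvIsFence]

-- ===== VERDICT (by name: the statement is the Claim_ definition above) =====
theorem normalize_feishu_markdown_spec : Claim_equal_normalize_feishu_markdown := by
  intro text _
  show _ = _
  simp only [normalize_feishu_markdown, normalize_feishu_markdown_alt]
  rw [pvFoldA_eq]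
  simp
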